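-- pv_equiv track=rewrite | github.com/erictao04/Reasoning-Motifs | tokenizer_v5/_common.py | subset_by_questions
-- ===== SOURCE A (Python) =====
-- def subset_by_questions(
--     rows: list[dict[str, str]], max_questions: int | None
-- ) -> list[dict[str, str]]:
--     """Keep all rows whose question_id is among the first N unique ids.
--
--     Order is the order of first appearance in ``rows``. ``None`` or
--     non-positive values return the input unchanged.
--     """
--     if not max_questions or max_questions <= 0:
--         return rows
--     seen: list[str] = []
--     seen_set: set[str] = set()
--     for r in rows:
--         qid = r.get("question_id", "")
--         if qid not in seen_set:
--             seen_set.add(qid)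
--             seen.append(qid)
--             if len(seen) >= max_questions:
--                 break
--     keep_set = set(seen)
--     return [r for r in rows if r.get("question_id", "") in keep_set]
-- ===== SOURCE B (Python) =====
-- def subset_by_questions(
--     rows: list[dict[str, str]], max_questions: int | None
-- ) -> list[dict[str, str]]:
--     """Single streaming pass: keep rows whose question_id is among the
--     first max_questions unique ids, deciding row by row."""
--     if not max_questions or max_questions <= 0:
--         return rows
--     keep_set: set[str] = set()
--     count = 0
--     out: list[dict[str, str]] = []
--     for r in rows:
--         qid = r.get("question_id", "")
--         if qid in keep_set:
--             out.append(r)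
--         elif count < max_questions:
--             keep_set.add(qid)
--             count += 1
--             out.append(r)
--     return out
-- ===== Notes on version B (the rewrite author's own statement) =====
-- stated objective: simpler
-- what changed: A builds the set of first-N unique ids in one pass and then filters all rows in a second pass; B makes a single streaming pass that grows the keep-set and emits each kept row immediately.
import Mathlib
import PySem

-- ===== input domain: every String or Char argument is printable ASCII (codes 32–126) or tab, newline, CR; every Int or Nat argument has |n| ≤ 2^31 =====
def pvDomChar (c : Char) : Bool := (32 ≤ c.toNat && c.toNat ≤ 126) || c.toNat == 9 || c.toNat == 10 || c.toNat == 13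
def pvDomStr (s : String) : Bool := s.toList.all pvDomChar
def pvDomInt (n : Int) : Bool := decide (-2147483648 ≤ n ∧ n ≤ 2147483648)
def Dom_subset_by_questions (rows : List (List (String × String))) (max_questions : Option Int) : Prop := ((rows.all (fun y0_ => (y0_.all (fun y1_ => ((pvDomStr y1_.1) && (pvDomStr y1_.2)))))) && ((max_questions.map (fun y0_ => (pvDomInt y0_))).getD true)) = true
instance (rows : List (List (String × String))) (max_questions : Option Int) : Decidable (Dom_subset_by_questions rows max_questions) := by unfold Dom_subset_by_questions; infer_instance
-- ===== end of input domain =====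

-- B replaces A's two passes (collect first-N unique ids, then filter) by one streaming pass; equal return values.
-- ===== PORT A =====
def pvQid (r : List (String × String)) : String :=
  PySem.Dict.getD (PySem.Dict.mk r) "question_id" ""

def pvSeenLoop (rows : List (List (String × String))) (m : Int)
    (seen : List String) (sset : PySem.Set String) : List String :=
  match rows with
  | [] => seen
  | r :: rest =>
    let qid := pvQid r
    if PySem.Set.contains sset qid then
      pvSeenLoop rest m seen sset
    else
      let sset' := PySem.Set.add sset qid
      let seen' := seen ++ [qid]
      if m ≤ (seen'.length : Int) then seen'
      else pvSeenLoop rest m seen' sset'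

def subset_by_questions (rows : List (List (String × String))) (max_questions : Option Int) : List (List (String × String)) :=
  match max_questions with
  | none => rows
  | some m =>
    if m ≤ 0 then rows
    else
      let seen := pvSeenLoop rows m [] PySem.Set.empty
      let keepSet := PySem.Set.ofList seen
      rows.filter (fun r => PySem.Set.contains keepSet (pvQid r))

-- ===== PORT B =====
def pvKeepLoop (rows : List (List (String × String))) (m : Int)
    (keep : PySem.Set String) (cnt : Int) : List (List (String × String)) :=
  match rows with
  | [] => []
  | r :: rest =>
    let qid := pvQid r
    if PySem.Set.contains keep qid then
      r :: pvKeepLoop rest m keep cnt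
    else if cnt < m then
      r :: pvKeepLoop rest m (PySem.Set.add keep qid) (cnt + 1)
    else
      pvKeepLoop rest m keep cnt

def subset_by_questions_alt (rows : List (List (String × String))) (max_questions : Option Int) : List (List (String × String)) :=
  match max_questions with
  | none => rows
  | some m =>
    if m ≤ 0 then rows
    else pvKeepLoop rows m PySem.Set.empty 0

-- ===== PRECONDITION & SPEC =====
def Spec_subset_by_questions (rows : List (List (String × String))) (max_questions : Option Int) (out : List (List (String × String))) : Prop := out = subset_by_questions_alt rows max_questions
instance (rows : List (List (String × String))) (max_questions : Option Int) (out : List (List (String × String))) : Decidable (Spec_subset_by_questions rows max_questions out) := by unfold Spec_subset_by_questions; infer_instance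

-- ===== CLAIM (what is proved, stated in full; the proofs are below) =====
def Claim_equal_subset_by_questions : Prop := ∀ (rows : List (List (String × String))) (max_questions : Option Int), Dom_subset_by_questions rows max_questions → Spec_subset_by_questions rows max_questions (subset_by_questions rows max_questions)

-- ===== LEMMAS AND PROOFS =====

-- once the counter has reached m, B's loop is a plain filter by the current keep-set
theorem pvKeepLoop_saturated (rows : List (List (String × String))) (m : Int)
    (keep : PySem.Set String) (cnt : Int) (h : m ≤ cnt) :
    pvKeepLoop rows m keep cnt
      = rows.filter (fun r => PySem.Set.contains keep (pvQid r)) := by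
  induction rows with
  | nil => rfl
  | cons r rest ih =>
    by_cases hc : pvQid r ∈ keep
    · simp [pvKeepLoop, PySem.Set.contains, hc, ih]
    · simp [pvKeepLoop, PySem.Set.contains, hc, ih, not_lt.mpr h]

-- A's collection loop only extends its accumulator
theorem pvSeenLoop_prefix (rows : List (List (String × String))) (m : Int)
    (seen : List String) (sset : PySem.Set String) :
    ∃ t, pvSeenLoop rows m seen sset = seen ++ t := by
  induction rows generalizing seen sset with
  | nil => exact ⟨[], by simp [pvSeenLoop]⟩
  | cons r rest ih =>
    by_cases hc : pvQid r ∈ sset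
    · obtain ⟨t, ht⟩ := ih seen sset
      exact ⟨t, by simp [pvSeenLoop, hc, ht]⟩
    · by_cases hm : m ≤ (seen.length : Int) + 1
      · exact ⟨[pvQid r], by simp [pvSeenLoop, hc, hm]⟩
      · obtain ⟨t, ht⟩ := ih (seen ++ [pvQid r]) (PySem.Set.add sset (pvQid r))
        rw [show PySem.Set.add sset (pvQid r) = sset ++ [pvQid r] from by
          simp [PySem.Set.add, PySem.Set.contains, hc]] at ht
        exact ⟨pvQid r :: t, by simp [pvSeenLoop, hc, hm, ht]⟩

theorem mem_pvSeenLoop (rows : List (List (String × String))) (m : Int)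
    (seen : List String) (sset : PySem.Set String) (q : String) (hq : q ∈ seen) :
    q ∈ pvSeenLoop rows m seen sset := by
  obtain ⟨t, ht⟩ := pvSeenLoop_prefix rows m seen sset
  rw [ht]; exact List.mem_append_left t hq

-- main invariant: while the counter (= number of ids collected so far) is below m,
-- B's streaming loop equals filtering by the final keep-set A computes
theorem pvKeepLoop_eq_filter (rows : List (List (String × String))) (m : Int)
    (seen : List String) (h : (seen.length : Int) < m) :
    pvKeepLoop rows m seen (seen.length : Int)
      = rows.filter (fun r =>
          PySem.Set.contains (PySem.Set.ofList (pvSeenLoop rows m seen seen)) (pvQid r)) := by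
  induction rows generalizing seen with
  | nil => rfl
  | cons r rest ih =>
    by_cases hc : pvQid r ∈ seen
    · have hfin : pvQid r ∈ pvSeenLoop rest m seen seen :=
        mem_pvSeenLoop rest m seen seen _ hc
      simp [pvKeepLoop, pvSeenLoop, PySem.Set.contains, hc, hfin, ih seen h]
    · by_cases hm : m ≤ (seen.length : Int) + 1
      · have hsat := pvKeepLoop_saturated rest m (seen ++ [pvQid r]) ((seen.length : Int) + 1) hm
        simp [pvKeepLoop, pvSeenLoop, PySem.Set.contains, hc, hm, h,
          hsat, List.contains_eq_mem]
      · have h' : (((seen ++ [pvQid r]).length : Int)) < m := by simp; omega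
        have hmemhead : pvQid r ∈ pvSeenLoop rest m (seen ++ [pvQid r]) (seen ++ [pvQid r]) :=
          mem_pvSeenLoop rest m _ _ _ (by simp)
        have hih := ih (seen ++ [pvQid r]) h'
        simp only [List.length_append, List.length_cons, List.length_nil, Nat.cast_add,
          Nat.cast_one, Nat.cast_zero, zero_add, PySem.Set.contains, List.contains_eq_mem,
          PySem.Set.mem_ofList] at hih
        simp [pvKeepLoop, pvSeenLoop, PySem.Set.contains, hc, hm, h,
          hmemhead, hih]

-- ===== VERDICT (by name: the statement is the Claim_ definition above) =====
theorem subset_by_questions_spec : Claim_equal_subset_by_questions := by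
  intro rows mq _
  unfold Spec_subset_by_questions subset_by_questions subset_by_questions_alt
  cases mq with
  | none => rfl
  | some m =>
    by_cases hm : m ≤ 0
    · simp [hm]
    · have h0 : ((([] : List String).length : Int)) < m := by simp; omega
      simpa [hm, PySem.Set.empty] using (pvKeepLoop_eq_filter rows m [] h0).symm
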